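-- pv_equiv track=rewrite | github.com/jorgeAndoni/FapespClassification | new_features_processing.py | replace_area
-- ===== SOURCE A (Python) =====
-- def replace_area(list_area):
--   nivel_1 = []
--   nivel_2 = []
--   nivel_3 = []
--   for stri in list_area:
--     stri = stri.split("-")
--     if len(stri) >= 3:
--       nivel_1.append(stri[0].strip())
--       nivel_2.append(stri[1].strip())
--       nivel_3.append(stri[2].strip())
--     elif len(stri) == 2:
--       nivel_1.append(stri[0].strip())
--       nivel_2.append(stri[1].strip())
--       nivel_3.append("")
--     else:
--       nivel_1.append(stri[0].strip())
--       nivel_2.append("")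
--       nivel_3.append("")
--   return nivel_1, nivel_2, nivel_3
-- ===== SOURCE B (Python) =====
-- def replace_area(list_area):
--     rows = []
--     for stri in list_area:
--         parts = [s.strip() for s in stri.split("-")[:3]]
--         while len(parts) < 3:
--             parts.append("")
--         rows.append(parts)
--     if not rows:
--         return [], [], []
--     cols = list(map(list, zip(*rows)))
--     return cols[0], cols[1], cols[2]
-- ===== Notes on version B (the rewrite author's own statement) =====
-- stated objective: alternative
-- what changed: Replaces A's three-way branch that distributes each string's pieces into three parallel accumulators with a build-normalized-rows-then-transpose strategy: each string becomes one padded 3-element row, and the three level lists are the columns of the row matrix.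
import Mathlib
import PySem

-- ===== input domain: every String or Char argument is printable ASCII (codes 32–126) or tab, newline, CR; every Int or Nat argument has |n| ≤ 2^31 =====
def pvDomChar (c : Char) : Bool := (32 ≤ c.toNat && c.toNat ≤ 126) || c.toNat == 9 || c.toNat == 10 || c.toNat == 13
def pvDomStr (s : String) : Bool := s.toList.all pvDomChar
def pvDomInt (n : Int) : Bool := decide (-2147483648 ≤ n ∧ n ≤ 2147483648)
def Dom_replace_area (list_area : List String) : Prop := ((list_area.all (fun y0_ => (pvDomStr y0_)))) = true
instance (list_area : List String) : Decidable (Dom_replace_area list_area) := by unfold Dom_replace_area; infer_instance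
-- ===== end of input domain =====

-- B replaces A's three-way branch into parallel accumulators with a build-padded-rows-then-transpose decomposition (alternative, same cost).


-- ===== PORT A =====
-- The loop appending to nivel_1/nivel_2/nivel_3 becomes a foldl over the triple of lists.
-- stri.split("-") has a non-empty separator, so split? is always some (.getD [] only totalizes);
-- the pyGet? indices are in range by the length guards ('.getD ""' only totalizes).
def replace_area (list_area : List String) : List String × List String × List String :=
  list_area.foldl
    (fun acc stri =>
      let parts := (PySem.Str.split? stri "-").getD []
      if parts.length ≥ 3 then
        (acc.1 ++ [PySem.Str.strip ((PySem.List.pyGet? parts 0).getD "")],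
         acc.2.1 ++ [PySem.Str.strip ((PySem.List.pyGet? parts 1).getD "")],
         acc.2.2 ++ [PySem.Str.strip ((PySem.List.pyGet? parts 2).getD "")])
      else if parts.length = 2 then
        (acc.1 ++ [PySem.Str.strip ((PySem.List.pyGet? parts 0).getD "")],
         acc.2.1 ++ [PySem.Str.strip ((PySem.List.pyGet? parts 1).getD "")],
         acc.2.2 ++ [""])
      else
        (acc.1 ++ [PySem.Str.strip ((PySem.List.pyGet? parts 0).getD "")],
         acc.2.1 ++ [""],
         acc.2.2 ++ [""]))
    ([], [], [])

-- ===== PORT B =====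
-- the 'while len(parts) < 3: parts.append("")' loop of Source B
def pvPad3 (parts : List String) : List String :=
  if parts.length < 3 then pvPad3 (parts ++ [""]) else parts
termination_by 3 - parts.length

-- one normalized row: [s.strip() for s in stri.split("-")[:3]], padded to length 3
def pvRow (stri : String) : List String :=
  pvPad3 ((PySem.List.slice ((PySem.Str.split? stri "-").getD []) none (some 3)).map PySem.Str.strip)

-- zip(*rows): every row has length exactly 3, so the three columns are the entries at 0, 1, 2
def replace_area_alt (list_area : List String) : List String × List String × List String :=
  let rows := list_area.map pvRow
  if rows.isEmpty then ([], [], [])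
  else
    (rows.map (fun r => r.getD 0 ""),
     rows.map (fun r => r.getD 1 ""),
     rows.map (fun r => r.getD 2 ""))

-- ===== PRECONDITION & SPEC =====
def Spec_replace_area (list_area : List String) (out : List String × List String × List String) : Prop := out = replace_area_alt list_area
instance (list_area : List String) (out : List String × List String × List String) : Decidable (Spec_replace_area list_area out) := by unfold Spec_replace_area; infer_instance

-- ===== CLAIM (what is proved, stated in full; the proofs are below) =====
def Claim_equal_replace_area : Prop := ∀ (list_area : List String), Dom_replace_area list_area → Spec_replace_area list_area (replace_area list_area)

-- ===== LEMMAS AND PROOFS =====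

-- column i of the row built from stri
def pvCol (i : Nat) (stri : String) : String := (pvRow stri).getD i ""

theorem pvGet_nil : PySem.List.pyGet? ([] : List String) 0 = none := by
  simp [PySem.List.pyGet?, PySem.List.pyIdx?]

theorem pvGet_one (a b : String) (t : List String) : PySem.List.pyGet? (a::b::t) 1 = some b := by
  simp [PySem.List.pyGet?, PySem.List.pyIdx?]

theorem pvGet_two (a b c : String) (t : List String) : PySem.List.pyGet? (a::b::c::t) 2 = some c := by
  simp [PySem.List.pyGet?, PySem.List.pyIdx?, show (2:Int) ≤ (t.length:Int)+1+1 from by omega]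

-- A's loop body appends exactly the three column entries of the row for stri
theorem replace_area_step (acc : List String × List String × List String) (stri : String) :
    (let parts := (PySem.Str.split? stri "-").getD []
     if parts.length ≥ 3 then
       (acc.1 ++ [PySem.Str.strip ((PySem.List.pyGet? parts 0).getD "")],
        acc.2.1 ++ [PySem.Str.strip ((PySem.List.pyGet? parts 1).getD "")],
        acc.2.2 ++ [PySem.Str.strip ((PySem.List.pyGet? parts 2).getD "")])
     else if parts.length = 2 then
       (acc.1 ++ [PySem.Str.strip ((PySem.List.pyGet? parts 0).getD "")],
        acc.2.1 ++ [PySem.Str.strip ((PySem.List.pyGet? parts 1).getD "")],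
        acc.2.2 ++ [""])
     else
       (acc.1 ++ [PySem.Str.strip ((PySem.List.pyGet? parts 0).getD "")],
        acc.2.1 ++ [""],
        acc.2.2 ++ [""]))
    = (acc.1 ++ [pvCol 0 stri], acc.2.1 ++ [pvCol 1 stri], acc.2.2 ++ [pvCol 2 stri]) := by
  simp only [pvCol, pvRow]
  rcases h : (PySem.Str.split? stri "-").getD [] with _ | ⟨a, _ | ⟨b, _ | ⟨c, t⟩⟩⟩ <;>
    simp [pvPad3, pvGet_nil, pvGet_one, pvGet_two, PySem.List.slice, PySem.Str.strip,
      PySem.Chars.strip, PySem.Chars.lstrip, PySem.Chars.rstrip]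

-- the foldl of A, run from any accumulator, appends the three column lists
theorem replace_area_foldl (l : List String) (a b c : List String) :
    l.foldl
      (fun acc stri =>
        let parts := (PySem.Str.split? stri "-").getD []
        if parts.length ≥ 3 then
          (acc.1 ++ [PySem.Str.strip ((PySem.List.pyGet? parts 0).getD "")],
           acc.2.1 ++ [PySem.Str.strip ((PySem.List.pyGet? parts 1).getD "")],
           acc.2.2 ++ [PySem.Str.strip ((PySem.List.pyGet? parts 2).getD "")])
        else if parts.length = 2 then
          (acc.1 ++ [PySem.Str.strip ((PySem.List.pyGet? parts 0).getD "")],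
           acc.2.1 ++ [PySem.Str.strip ((PySem.List.pyGet? parts 1).getD "")],
           acc.2.2 ++ [""])
        else
          (acc.1 ++ [PySem.Str.strip ((PySem.List.pyGet? parts 0).getD "")],
           acc.2.1 ++ [""],
           acc.2.2 ++ [""]))
      (a, b, c)
    = (a ++ l.map (pvCol 0), b ++ l.map (pvCol 1), c ++ l.map (pvCol 2)) := by
  induction l generalizing a b c with
  | nil => simp
  | cons s l ih =>
      rw [List.foldl_cons, replace_area_step (a, b, c) s, ih]
      simp

-- ===== VERDICT (by name: the statement is the Claim_ definition above) =====
theorem replace_area_spec : Claim_equal_replace_area := by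
  intro l _
  show replace_area l = replace_area_alt l
  rw [replace_area, replace_area_foldl]
  cases l with
  | nil => simp [replace_area_alt]
  | cons s t =>
      simp [replace_area_alt, pvCol, Function.comp]
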